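-- pv_equiv track=rewrite | github.com/JenaCChen/IRwithCrossEncoder | src/scoring.py | invert_gold_standard
-- ===== SOURCE A (Python) =====
-- from typing import List, Dict, Union, Generator, Tuple
-- from typing import Sequence, NamedTuple, List
--
-- top_k = 10
--
-- def invert_gold_standard(gold_standard: Dict[str, Dict], k: int = top_k) -> Dict[str, List]:
--     """
--     helper func that returns a dictionary mapping query_id with to corresponding IDCG
--     """
--     invert_gold = {}  # {query_id: [1, 1, 1, 2, 2]}
--     for doc_id in gold_standard:
--         for query_id in gold_standard[doc_id]:
--             if query_id not in invert_gold:
--                 invert_gold[query_id] = []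
--             invert_gold[query_id].append(gold_standard[doc_id][query_id])
--     invert_gold = {query_id: sorted(invert_gold[query_id], reverse=True)[:k] for query_id in invert_gold}
--     return invert_gold
-- ===== SOURCE B (Python) =====
-- top_k = 10
--
-- def invert_gold_standard(gold_standard, k=top_k):
--     # Single grouping pass keeping, per query_id, only a bounded descending-sorted
--     # list of at most k scores (online insertion + truncation), instead of storing
--     # every score and sorting/slicing afterwards.
--     best = {}
--     for queries in gold_standard.values():
--         for query_id, score in queries.items():
--             lst = best.setdefault(query_id, [])
--             i = 0
--             while i < len(lst) and lst[i] >= score: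
--                 i += 1
--             lst.insert(i, score)
--             if len(lst) > k:
--                 lst.pop()
--     return best
-- ===== Notes on version B (the rewrite author's own statement) =====
-- stated objective: alternative
-- what changed: Replaces A's collect-everything-then-sort-and-slice (unbounded list per query, sorted(...)[: k] at the end) with a single grouping pass that maintains per query a bounded descending-sorted list of at most k scores, inserting each score in order and truncating during the traversal.
-- outside the precondition, e.g. on invert_gold_standard({'d1': {'q': 1}, 'd2': {'q': 2}}, -1): A returns {'q': [2]}, B returns {'q': []}
import Mathlib
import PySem

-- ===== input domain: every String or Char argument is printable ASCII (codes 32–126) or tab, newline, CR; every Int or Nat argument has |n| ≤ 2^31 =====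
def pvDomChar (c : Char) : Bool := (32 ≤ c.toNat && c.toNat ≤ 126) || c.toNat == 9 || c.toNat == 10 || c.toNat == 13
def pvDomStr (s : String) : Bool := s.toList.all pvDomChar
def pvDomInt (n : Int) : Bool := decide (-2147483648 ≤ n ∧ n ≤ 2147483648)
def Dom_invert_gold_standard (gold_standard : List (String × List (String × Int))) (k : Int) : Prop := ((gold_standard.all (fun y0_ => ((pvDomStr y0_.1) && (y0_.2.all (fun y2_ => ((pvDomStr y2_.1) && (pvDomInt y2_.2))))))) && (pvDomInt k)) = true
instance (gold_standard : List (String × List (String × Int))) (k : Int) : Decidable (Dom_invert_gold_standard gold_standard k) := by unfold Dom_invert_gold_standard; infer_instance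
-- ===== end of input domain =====

-- B replaces A's "collect every score per query, then sort and slice" with a single
-- grouping pass that maintains, per query, a descending-sorted list truncated to at
-- most k scores during the traversal (objective: alternative bounded-state algorithm).

-- ===== PORT A =====
-- 'for doc_id in gold_standard' iterates the keys; 'gold_standard[doc_id]' /
-- 'gold_standard[doc_id][query_id]' are first-match lookups of keys taken from the
-- dict itself, so they never raise: .getD with a default is exact here.

-- body of A's inner loop: 'if query_id not in invert_gold: invert_gold[query_id] = []'
-- then 'invert_gold[query_id].append(score)'
def pvStepA (d : PySem.Dict String (List Int)) (query_id : String) (score : Int) : PySem.Dict String (List Int) :=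
  let d1 := if d.contains query_id then d else d.insert query_id []
  d1.insert query_id (d1.getD query_id [] ++ [score])

-- A's inner loop: 'for query_id in gold_standard[doc_id]: ... gold_standard[doc_id][query_id]'
def pvInnerA (doc : List (String × Int)) (d : PySem.Dict String (List Int)) : PySem.Dict String (List Int) :=
  (doc.map Prod.fst).foldl (fun d query_id => pvStepA d query_id ((PySem.Dict.mk doc).getD query_id 0)) d

def invert_gold_standard (gold_standard : List (String × List (String × Int))) (k : Int) : List (String × List Int) :=
  let invert_gold : PySem.Dict String (List Int) :=
    (gold_standard.map Prod.fst).foldl (fun d doc_id => pvInnerA ((PySem.Dict.mk gold_standard).getD doc_id []) d)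
      PySem.Dict.empty
  (invert_gold.keys.foldl (fun r query_id =>
      r.insert query_id (PySem.List.slice (PySem.List.sorted (invert_gold.getD query_id []) (fun x => x) true) none (some k)))
    PySem.Dict.empty).items

-- ===== PORT B =====
-- Source B's hand-written while-loop: insert score after the elements ≥ score of the
-- descending-sorted list ('while i < len(lst) and lst[i] >= score: i += 1; lst.insert(i, score)').
def pvInsDesc (score : Int) : List Int → List Int
  | [] => [score]
  | x :: xs => if score ≤ x then x :: pvInsDesc score xs else score :: x :: xs

-- one iteration of Source B's inner loop body ('lst = best.setdefault(query_id, []); …; lst.insert(i, score); if len(lst) > k: lst.pop()')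
def pvStepB (k : Int) (d : PySem.Dict String (List Int)) (p : String × Int) : PySem.Dict String (List Int) :=
  let lst := d.getD p.1 []
  let lst' := pvInsDesc p.2 lst
  let lst'' := if (lst'.length : Int) > k then lst'.dropLast else lst'
  d.insert p.1 lst''

def invert_gold_standard_alt (gold_standard : List (String × List (String × Int))) (k : Int) : List (String × List Int) :=
  (gold_standard.foldl (fun d p => p.2.foldl (pvStepB k) d) PySem.Dict.empty).items

-- ===== PRECONDITION & SPEC =====
-- Pre_ excludes negative k — outside the function's natural top-k domain, where A's
-- slice [:k] returns an accidental suffix while B naturally keeps nothing — and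
-- association lists with duplicate outer or inner keys, which do not represent any
-- Python dict (A's key-wise lookups and B's item-wise pass read them differently).
def Pre_invert_gold_standard (gold_standard : List (String × List (String × Int))) (k : Int) : Prop :=
  0 ≤ k ∧ (gold_standard.map Prod.fst).Nodup ∧ ∀ p ∈ gold_standard, (p.2.map Prod.fst).Nodup
instance (gold_standard : List (String × List (String × Int))) (k : Int) : Decidable (Pre_invert_gold_standard gold_standard k) := by unfold Pre_invert_gold_standard; infer_instance

def pvWitness_invert_gold_standard : (List (String × List (String × Int))) × Int :=
  ([("d1", [("q1", 3), ("q2", 1)]), ("d2", [("q1", 2)])], 2)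

def Spec_invert_gold_standard (gold_standard : List (String × List (String × Int))) (k : Int) (out : List (String × List Int)) : Prop := out = invert_gold_standard_alt gold_standard k
instance (gold_standard : List (String × List (String × Int))) (k : Int) (out : List (String × List Int)) : Decidable (Spec_invert_gold_standard gold_standard k out) := by unfold Spec_invert_gold_standard; infer_instance

-- ===== CLAIM (what is proved, stated in full; the proofs are below) =====
def Claim_equal_invert_gold_standard : Prop := ∀ (gold_standard : List (String × List (String × Int))) (k : Int), Dom_invert_gold_standard gold_standard k → Pre_invert_gold_standard gold_standard k → Spec_invert_gold_standard gold_standard k (invert_gold_standard gold_standard k)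

-- ===== LEMMAS AND PROOFS =====

-- `sorted(xs, reverse=True)[:n]` of all scores seen so far, the value both programs keep per query
def pvTopk (n : Nat) (m : List Int) : List Int :=
  (PySem.List.sorted m (fun x => x) true).take n

lemma pvInsDesc_eq_insertBy (s : Int) (l : List Int) :
    pvInsDesc s l = PySem.List.insertBy (fun a b => decide (b < a)) s l := by
  induction l with
  | nil => rfl
  | cons x xs ih =>
      by_cases h : s ≤ x <;>
        simp [pvInsDesc, PySem.List.insertBy, h, ih]

lemma pvSorted_append_singleton (m : List Int) (s : Int) :
    PySem.List.sorted (m ++ [s]) (fun x => x) true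
      = pvInsDesc s (PySem.List.sorted m (fun x => x) true) := by
  rw [PySem.List.sorted_rev_eq_foldl_insertBy, PySem.List.sorted_rev_eq_foldl_insertBy,
    List.foldl_append, pvInsDesc_eq_insertBy]
  rfl

lemma pvInsDesc_length (s : Int) (m : List Int) : (pvInsDesc s m).length = m.length + 1 := by
  induction m with
  | nil => rfl
  | cons x xs ih => by_cases h : s ≤ x <;> simp [pvInsDesc, h, ih]

lemma pvTake_insDesc (s : Int) (m : List Int) (n : Nat) :
    (pvInsDesc s m).take n = (pvInsDesc s (m.take n)).take n := by
  induction m generalizing n with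
  | nil => simp
  | cons x xs ih =>
      by_cases h : s ≤ x
      · cases n with
        | zero => simp
        | succ n' => simp [pvInsDesc, h, ih]
      · cases n with
        | zero => simp
        | succ n' =>
            cases n' with
            | zero => simp [pvInsDesc, h]
            | succ m' => simp [pvInsDesc, h, List.take_take]

lemma pvBound_eq_take (n : Nat) (l : List Int) (h : l.length ≤ n + 1) :
    (if (l.length : Int) > (n : Int) then l.dropLast else l) = l.take n := by
  split_ifs with hc
  · have hl : l.length = n + 1 := by omega
    rw [List.dropLast_eq_take, hl]
    simp
  · rw [List.take_of_length_le (by omega)]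

lemma pvTopk_append (n : Nat) (m : List Int) (s : Int) :
    pvTopk n (m ++ [s])
      = (if ((pvInsDesc s (pvTopk n m)).length : Int) > (n : Int)
          then (pvInsDesc s (pvTopk n m)).dropLast else pvInsDesc s (pvTopk n m)) := by
  rw [pvBound_eq_take]
  · unfold pvTopk
    rw [pvSorted_append_singleton, pvTake_insDesc]
  · rw [pvInsDesc_length]
    have h : (pvTopk n m).length ≤ n := by
      simp only [pvTopk]; exact List.length_take_le n _
    omega

lemma pvStepB_getD (k : Int) (l : List (String × Int))
    (d : PySem.Dict String (List Int)) (q : String) :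
    (l.foldl (pvStepB k) d).getD q []
      = ((l.filter (fun p => p.1 == q)).map Prod.snd).foldl
          (fun m s => if ((pvInsDesc s m).length : Int) > k then (pvInsDesc s m).dropLast else pvInsDesc s m)
          (d.getD q []) := by
  induction l generalizing d with
  | nil => rfl
  | cons p rest ih =>
      by_cases hq : p.1 = q
      · subst hq
        simp only [List.foldl_cons, List.filter_cons, beq_self_eq_true, if_pos, List.map_cons]
        rw [ih]
        simp [pvStepB]
      · have hbq : (p.1 == q) = false := beq_false_of_ne hq
        simp only [List.foldl_cons, List.filter_cons, hbq]
        rw [ih]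
        simp [pvStepB, PySem.Dict.getD_insert, Ne.symm hq]

lemma pvFoldl_bound_eq_topk (k : Int) (hk : 0 ≤ k) (xs : List Int) :
    xs.foldl (fun m s => if ((pvInsDesc s m).length : Int) > k then (pvInsDesc s m).dropLast else pvInsDesc s m) []
      = pvTopk k.toNat xs := by
  induction xs using List.reverseRecOn with
  | nil =>
      have h : PySem.List.sorted ([] : List Int) (fun x => x) true = [] := rfl
      rw [List.foldl_nil, pvTopk, h, List.take_nil]
  | append_singleton ys y ih =>
      rw [List.foldl_append, List.foldl_cons, List.foldl_nil, ih, pvTopk_append]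
      have : ((k.toNat : Nat) : Int) = k := Int.toNat_of_nonneg hk
      rw [this]

-- A's conditional-then-append step is exactly Dict.modify
lemma pvStepA_eq_modify (d : PySem.Dict String (List Int)) (q : String) (v : Int) :
    pvStepA d q v = d.modify q [] (fun l => l ++ [v]) := by
  unfold pvStepA
  by_cases h : d.contains q = true
  · simp [h, PySem.Dict.modify]
  · have hnot : d.contains q = false := by simpa using h
    simp only [hnot, Bool.false_eq_true, if_false, PySem.Dict.modify]
    rw [PySem.Dict.getD_insert_self, PySem.Dict.getD_of_not_contains _ _ hnot]
    exact PySem.Dict.insert_insert_self d q [] ([] ++ [v])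

-- fold over a dict's keys with first-match lookups = fold over its items
lemma pvFoldl_keys_lookup {ν β : Type} (dflt : ν) (F : β → String → ν → β) :
    ∀ (w l : List (String × ν)) (init : β),
      (∀ p ∈ l, (PySem.Dict.mk w).getD p.1 dflt = p.2) →
      (l.map Prod.fst).foldl (fun acc q => F acc q ((PySem.Dict.mk w).getD q dflt)) init
        = l.foldl (fun acc p => F acc p.1 p.2) init := by
  intro w l
  induction l with
  | nil => intro init _; rfl
  | cons p rest ih =>
      intro init h
      simp only [List.map_cons, List.foldl_cons, h p (by simp)]
      exact ih _ (fun p hp => h p (by simp [hp]))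

lemma pvDict_items_eq_keys_map {ν : Type} (d : PySem.Dict String ν) (v0 : ν)
    (h : d.keys.Nodup) : d.items = d.keys.map (fun q => (q, d.getD q v0)) := by
  have : d.items.map (fun p => (p.1, d.getD p.1 v0)) = d.items.map id := by
    apply List.map_congr_left
    intro p hp
    have := PySem.Dict.getD_of_mem_items d (k := p.1) (v := p.2) (by simpa using hp) h v0
    simp [this]
  have hkeys : d.keys = d.items.map Prod.fst := rfl
  rw [hkeys, List.map_map]
  simpa using this.symm

lemma pvGetD_mk_of_mem {ν : Type} (l : List (String × ν)) (dflt : ν)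
    (hnd : (l.map Prod.fst).Nodup) {p : String × ν} (hp : p ∈ l) :
    (PySem.Dict.mk l).getD p.1 dflt = p.2 := by
  have h1 : (PySem.Dict.mk l).get? p.1 = some p.2 :=
    PySem.Dict.get?_of_mem_items (PySem.Dict.mk l) (by simpa using hp) (by simpa using hnd)
  rw [PySem.Dict.getD_eq_get?_getD, h1]
  rfl

-- ===== VERDICT (by name: the statement is the Claim_ definition above) =====
theorem invert_gold_standard_spec : Claim_equal_invert_gold_standard := by
  intro gs k _ hpre
  obtain ⟨hk, hnodup, hinner⟩ := hpre
  unfold Spec_invert_gold_standard invert_gold_standard invert_gold_standard_alt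
  -- the flattened stream of (query_id, score) pairs both programs traverse
  -- A side, stage 1: the grouping dict is the modify-fold over the stream
  have hA1 : (gs.map Prod.fst).foldl (fun d doc_id => pvInnerA ((PySem.Dict.mk gs).getD doc_id []) d)
        PySem.Dict.empty
      = (gs.flatMap Prod.snd).foldl (fun d p => d.modify p.1 [] (fun l => l ++ [p.2])) PySem.Dict.empty := by
    rw [pvFoldl_keys_lookup [] (fun acc _ inner => pvInnerA inner acc) gs gs PySem.Dict.empty
      (fun p hp => pvGetD_mk_of_mem gs [] hnodup hp)]
    rw [List.foldl_flatMap]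
    apply PySem.List.foldl_congr_mem
    intro acc p hp
    unfold pvInnerA
    rw [pvFoldl_keys_lookup 0 (fun acc q v => pvStepA acc q v) p.2 p.2 acc
      (fun qp hqp => pvGetD_mk_of_mem p.2 0 (hinner p hp) hqp)]
    exact PySem.List.foldl_congr_mem _ _ _ _ (fun acc qp _ => pvStepA_eq_modify acc qp.1 qp.2)
  rw [hA1]
  -- B side: flatten the nested fold over the same stream
  rw [← List.foldl_flatMap (f := Prod.snd) (g := pvStepB k) (l := gs) (init := PySem.Dict.empty)]
  generalize (gs.flatMap Prod.snd) = stream at *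
  -- the two dicts
  have hstepB : pvStepB k = fun d p => d.insert p.1
      (if ((pvInsDesc p.2 (d.getD p.1 [])).length : Int) > k
        then (pvInsDesc p.2 (d.getD p.1 [])).dropLast else pvInsDesc p.2 (d.getD p.1 [])) := rfl
  -- keys of both dicts: first-occurrence query ids, without duplicates
  have hkeysA : (stream.foldl (fun d p => d.modify p.1 [] (fun l => l ++ [p.2])) PySem.Dict.empty).keys
      = PySem.Set.ofList (stream.map Prod.fst) := by
    rw [PySem.Dict.keys_foldl_modify_key stream Prod.fst [] (fun _ p => fun l => l ++ [p.2])]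
    rw [PySem.Set.ofList_eq_foldl]
    rfl
  have hkeysB : (stream.foldl (pvStepB k) PySem.Dict.empty).keys
      = PySem.Set.ofList (stream.map Prod.fst) := by
    rw [hstepB]
    rw [PySem.Dict.keys_foldl_insert_key stream Prod.fst
      (fun d p => if ((pvInsDesc p.2 (d.getD p.1 [])).length : Int) > k
        then (pvInsDesc p.2 (d.getD p.1 [])).dropLast else pvInsDesc p.2 (d.getD p.1 []))]
    rw [PySem.Set.ofList_eq_foldl]
    rfl
  have hnodupA : (stream.foldl (fun d p => d.modify p.1 [] (fun l => l ++ [p.2])) PySem.Dict.empty).keys.Nodup :=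
    PySem.Dict.nodup_keys_foldl_modify_key stream Prod.fst [] (fun _ p => fun l => l ++ [p.2])
      PySem.Dict.empty PySem.Dict.nodup_keys_empty
  have hnodupB : (stream.foldl (pvStepB k) PySem.Dict.empty).keys.Nodup := by
    rw [hstepB]
    exact PySem.Dict.nodup_keys_foldl_insert_key stream Prod.fst _ PySem.Dict.empty
      PySem.Dict.nodup_keys_empty
  -- A side, stage 2: the final comprehension is a map over the keys
  rw [PySem.Dict.items_foldl_insert_fresh _ (fun q => q) _ PySem.Dict.empty
    (fun a _ => PySem.Dict.contains_empty a) (by simpa using hnodupA)]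
  -- B side: items of the result dict as a map over its keys
  rw [pvDict_items_eq_keys_map _ [] hnodupB]
  have hempty : (PySem.Dict.empty : PySem.Dict String (List Int)).items = [] := rfl
  rw [hkeysA, hkeysB, hempty, List.nil_append]
  -- pointwise: each query id carries sorted(scores, reverse=True)[:k] on both sides
  apply List.map_congr_left
  intro q _
  have hgA : (stream.foldl (fun d p => d.modify p.1 [] (fun l => l ++ [p.2])) PySem.Dict.empty).getD q []
      = ((stream.filter (fun p => p.1 == q)).map (fun x => x.2)) := by
    rw [PySem.Dict.getD_foldl_modify_append stream PySem.Dict.empty q]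
    rw [PySem.Dict.getD_empty, List.nil_append]
  have hgB : (stream.foldl (pvStepB k) PySem.Dict.empty).getD q []
      = pvTopk k.toNat ((stream.filter (fun p => p.1 == q)).map Prod.snd) := by
    rw [pvStepB_getD k stream PySem.Dict.empty q, PySem.Dict.getD_empty]
    exact pvFoldl_bound_eq_topk k hk _
  rw [hgA, hgB, PySem.List.slice_to _ hk]
  rfl
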